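-- pv_equiv track=rewrite | github.com/jethridge13/AdventOfCode2021 | Day7/Day7.py | calcTotalFuel
-- ===== SOURCE A (Python) =====
-- def calcFuel(l, n):
--     cost = 0
--     for i in l:
--         cost += abs(i - n)
--     return cost
--
-- def calcFuel2(l, n):
--     cost = 0
--     for i in l:
--         diff = abs(i - n)
--         cost += (diff ** 2 + diff) // 2
--     return cost
--
-- def calcTotalFuel(l, part2=False):
--     costs = []
--     for i in range(max(l)):
--         if part2:
--             costs.append(calcFuel2(l, i))
--         else:
--             costs.append(calcFuel(l, i))
--     return costs
-- ===== SOURCE B (Python) =====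
-- def calcTotalFuel(l, part2=False):
--     m = max(l)
--     s = sorted(l)
--     length = len(l)
--     s1 = sum(l)
--     s2 = sum(x * x for x in l)
--     a = sum(abs(x) for x in l)  # sum of |x - n| for n = 0
--     k = 0                       # number of sorted elements known to be <= current target
--     costs = []
--     for n in range(m):
--         if part2:
--             sq = s2 - 2 * n * s1 + n * n * length  # sum of (x - n)^2
--             costs.append((sq + a) // 2)
--         else:
--             costs.append(a)
--         while k < length and s[k] <= n:
--             k += 1
--         a += 2 * k - length     # sum |x - (n+1)| from sum |x - n|
--     return costs
-- ===== Notes on version B (the rewrite author's own statement) =====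
-- stated objective: faster
-- what changed: Replaces the per-target rescans (sum of |x-n| / triangular costs over the whole list for every n) by sort + running totals: the absolute-distance sum is updated incrementally with a pointer into the sorted list, and part-2 squared sums come from a closed form over sum and sum-of-squares, giving O(n log n + max(l)) instead of O(n * max(l)).
import Mathlib
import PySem

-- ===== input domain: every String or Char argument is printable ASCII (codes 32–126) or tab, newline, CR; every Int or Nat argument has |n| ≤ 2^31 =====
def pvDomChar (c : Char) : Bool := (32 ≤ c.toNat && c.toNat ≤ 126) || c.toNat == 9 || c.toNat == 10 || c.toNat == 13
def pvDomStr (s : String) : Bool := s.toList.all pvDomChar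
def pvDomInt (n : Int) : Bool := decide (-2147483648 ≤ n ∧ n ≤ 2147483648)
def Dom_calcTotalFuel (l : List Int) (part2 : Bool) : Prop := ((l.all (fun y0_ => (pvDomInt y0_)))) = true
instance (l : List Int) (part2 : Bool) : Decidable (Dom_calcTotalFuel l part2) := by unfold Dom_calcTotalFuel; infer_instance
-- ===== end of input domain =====

-- B replaces A's full rescan of the list for every target position by sort + running totals
-- (incremental |x-n| sum via a pointer into the sorted list; closed form for the squared part),
-- for O(n log n + max(l)) instead of O(n * max(l)).

-- ===== PORT A =====
def calcFuel (l : List Int) (n : Int) : Int :=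
  l.foldl (fun cost i => cost + |i - n|) 0

def calcFuel2 (l : List Int) (n : Int) : Int :=
  l.foldl (fun cost i =>
    let diff := |i - n|
    cost + PySem.Int.floordiv (diff ^ 2 + diff) 2) 0

def calcTotalFuel (l : List Int) (part2 : Bool) : List Int :=
  match PySem.List.max? l (fun x => x) with
  | none => []   -- unreachable under Pre_ (max([]) raises ValueError)
  | some m =>
      (PySem.List.pyRange 0 m 1).foldl
        (fun costs i => costs ++ [if part2 then calcFuel2 l i else calcFuel l i]) []

-- ===== PORT B =====
-- the 'while k < length and s[k] <= n' loop: consume the sorted prefix ≤ n, counting into k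
def advanceB : List Int → Int → Int → List Int × Int
  | [], k, _ => ([], k)
  | x :: xs, k, n => if x ≤ n then advanceB xs (k + 1) n else (x :: xs, k)

-- the 'for n in range(m)' loop, carrying (rest of sorted list, k, a)
def loopB (part2 : Bool) (length s1 s2 : Int) : Nat → Int → List Int → Int → Int → List Int
  | 0, _, _, _, _ => []
  | fuel + 1, n, rest, k, a =>
      (if part2 then PySem.Int.floordiv ((s2 - 2 * n * s1 + n * n * length) + a) 2 else a) ::
        (let rk := advanceB rest k n
         loopB part2 length s1 s2 fuel (n + 1) rk.1 rk.2 (a + 2 * rk.2 - length))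

def calcTotalFuel_alt (l : List Int) (part2 : Bool) : List Int :=
  match PySem.List.max? l (fun x => x) with
  | none => []   -- unreachable under Pre_ (max([]) raises ValueError)
  | some m =>
      let s := PySem.List.sorted l (fun x => x)
      let length : Int := l.length
      let s1 := l.foldl (fun acc x => acc + x) 0
      let s2 := l.foldl (fun acc x => acc + x * x) 0
      let a := l.foldl (fun acc x => acc + |x|) 0
      loopB part2 length s1 s2 m.toNat 0 s 0 a

-- ===== PRECONDITION & SPEC =====
-- Pre_ excludes only the empty list, on which A raises ValueError (max of empty sequence).
def Pre_calcTotalFuel (l : List Int) (part2 : Bool) : Prop := l ≠ []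
instance (l : List Int) (part2 : Bool) : Decidable (Pre_calcTotalFuel l part2) := by
  unfold Pre_calcTotalFuel; infer_instance

def pvWitness_calcTotalFuel : List Int × Bool := ([1, 0, 3], true)

def Spec_calcTotalFuel (l : List Int) (part2 : Bool) (out : List Int) : Prop := out = calcTotalFuel_alt l part2
instance (l : List Int) (part2 : Bool) (out : List Int) : Decidable (Spec_calcTotalFuel l part2 out) := by unfold Spec_calcTotalFuel; infer_instance

-- ===== CLAIM (what is proved, stated in full; the proofs are below) =====
def Claim_equal_calcTotalFuel : Prop := ∀ (l : List Int) (part2 : Bool), Dom_calcTotalFuel l part2 → Pre_calcTotalFuel l part2 → Spec_calcTotalFuel l part2 (calcTotalFuel l part2)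

-- ===== LEMMAS AND PROOFS =====

-- the cost A computes for one target
def costA (part2 : Bool) (l : List Int) (n : Int) : Int :=
  if part2 then calcFuel2 l n else calcFuel l n

theorem calcFuel_eq_sum (l : List Int) (n : Int) :
    calcFuel l n = (l.map (fun i => |i - n|)).sum := by
  unfold calcFuel; rw [PySem.List.foldl_add l (fun i => |i - n|) 0]; ring

theorem calcFuel2_eq_sum (l : List Int) (n : Int) :
    calcFuel2 l n = (l.map (fun i => PySem.Int.floordiv (|i - n| ^ 2 + |i - n|) 2)).sum := by
  unfold calcFuel2
  rw [PySem.List.foldl_add l (fun i => PySem.Int.floordiv (|i - n| ^ 2 + |i - n|) 2) 0]; ring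

-- step: sum of |i-(n+1)| from sum of |i-n| and the count of elements ≤ n
theorem sumAbs_step (l : List Int) (n : Int) :
    (l.map (fun i => |i - (n + 1)|)).sum
      = (l.map (fun i => |i - n|)).sum
        + 2 * (l.countP (fun x => decide (x ≤ n)) : Int) - l.length := by
  induction l with
  | nil => simp
  | cons x xs ih =>
      simp only [List.map_cons, List.sum_cons, List.countP_cons, List.length_cons]
      by_cases h : x ≤ n
      · have h1 : |x - (n + 1)| = |x - n| + 1 := by
          rw [abs_of_nonpos (by omega), abs_of_nonpos (by omega)]; ring
        simp only [h, decide_true, if_pos]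
        rw [h1, ih]; push_cast; ring
      · have h1 : |x - (n + 1)| = |x - n| - 1 := by
          rw [abs_of_nonneg (by omega), abs_of_nonneg (by omega)]; ring
        simp only [h, decide_false]
        rw [h1, ih]; push_cast; ring

theorem calcFuel_step (l : List Int) (n : Int) :
    calcFuel l (n + 1)
      = calcFuel l n + 2 * (l.countP (fun x => decide (x ≤ n)) : Int) - l.length := by
  rw [calcFuel_eq_sum, calcFuel_eq_sum, sumAbs_step]

-- closed form for the part-2 cost
theorem part2_closed (l : List Int) (n : Int) :
    PySem.Int.floordiv
      (((l.map (fun x => x * x)).sum - 2 * n * (l.map (fun x => x)).sum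
          + n * n * l.length) + calcFuel l n) 2
      = calcFuel2 l n := by
  have key : ((l.map (fun x => x * x)).sum - 2 * n * (l.map (fun x => x)).sum
      + n * n * l.length) + calcFuel l n = 2 * calcFuel2 l n := by
    induction l with
    | nil => simp [calcFuel, calcFuel2]
    | cons x xs ih =>
        rw [calcFuel_eq_sum, calcFuel2_eq_sum] at *
        simp only [List.map_cons, List.sum_cons, List.length_cons]
        have hdvd : (2 : Int) ∣ |x - n| ^ 2 + |x - n| := by
          have := Int.even_mul_succ_self |x - n|
          rcases this with ⟨c, hc⟩
          exact ⟨c, by nlinarith [sq_abs (x - n), hc]⟩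
        have h2 : 2 * PySem.Int.floordiv (|x - n| ^ 2 + |x - n|) 2 = |x - n| ^ 2 + |x - n| := by
          rw [PySem.Int.floordiv_eq_ediv_of_pos (by norm_num)]
          rw [mul_comm]
          exact Int.ediv_mul_cancel hdvd
        have hsq : |x - n| ^ 2 = (x - n) ^ 2 := sq_abs (x - n)
        push_cast
        nlinarith [ih]
  rw [key, PySem.Int.floordiv_eq_ediv_of_pos (by norm_num : (0:Int) < 2)]
  exact Int.mul_ediv_cancel_left _ (by norm_num)

-- the pointer advance: counts exactly the elements ≤ n of a sorted remainder
theorem advanceB_spec (rest : List Int) (k n : Int) (hs : rest.Pairwise (· ≤ ·)) :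
    (advanceB rest k n).2 = k + (rest.countP (fun x => decide (x ≤ n)) : Int)
    ∧ (advanceB rest k n).1.Pairwise (· ≤ ·)
    ∧ (∀ x ∈ (advanceB rest k n).1, n < x)
    ∧ ∃ t, rest = t ++ (advanceB rest k n).1 ∧ (∀ x ∈ t, x ≤ n) := by
  induction rest generalizing k with
  | nil => exact ⟨by simp [advanceB], by simp [advanceB], by simp [advanceB], [], by simp [advanceB]⟩
  | cons x xs ih =>
      rw [List.pairwise_cons] at hs
      by_cases h : x ≤ n
      · obtain ⟨h1, h2, h3, t, ht, htle⟩ := ih (k + 1) hs.2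
        refine ⟨?_, ?_, ?_, x :: t, ?_, ?_⟩
        · simp [advanceB, h, h1]; ring
        · simpa [advanceB, h] using h2
        · simpa [advanceB, h] using h3
        · simp [advanceB, h]; exact ht
        · intro y hy
          rcases List.mem_cons.mp hy with rfl | hy
          · exact h
          · exact htle y hy
      · refine ⟨?_, ?_, ?_, [], by simp [advanceB, h], by simp⟩
        · have hcnt : (x :: xs).countP (fun y => decide (y ≤ n)) = 0 := by
            rw [List.countP_eq_zero]
            intro y hy
            rcases List.mem_cons.mp hy with rfl | hy
            · simpa using h
            · have := hs.1 y hy; simp; omega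
          simp [advanceB, h, hcnt]
        · simpa [advanceB, h] using List.pairwise_cons.mpr hs
        · intro y hy
          simp only [advanceB, if_neg h] at hy
          rcases List.mem_cons.mp hy with rfl | hy
          · omega
          · have := hs.1 y hy; omega

-- the main loop invariant: loopB produces exactly A's costs for targets n, n+1, …
theorem loopB_spec (part2 : Bool) (l s : List Int)
    (hperm : s.Perm l) (hsort : s.Pairwise (· ≤ ·)) :
    ∀ (fuel : Nat) (n : Int) (rest : List Int) (k a : Int) (t : List Int),
      s = t ++ rest → k = t.length → (∀ x ∈ t, x ≤ n - 1) →
      a = calcFuel l n →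
      loopB part2 l.length (l.map (fun x => x)).sum (l.map (fun x => x * x)).sum
          fuel n rest k a
        = (List.range fuel).map (fun j : Nat => costA part2 l (n + (j : Int))) := by
  intro fuel
  induction fuel with
  | zero => intro n rest k a t _ _ _ _; simp [loopB]
  | succ fuel ih =>
      intro n rest k a t hdec hk htle ha
      have hrest : rest.Pairwise (· ≤ ·) := by
        have := hsort; rw [hdec, List.pairwise_append] at this; exact this.2.1
      obtain ⟨hk', hsort', hgt', t', ht', htle'⟩ := advanceB_spec rest k n hrest
      -- the new count equals countP (· ≤ n) over all of l
      have hcount : (advanceB rest k n).2 = (l.countP (fun x => decide (x ≤ n)) : Int) := by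
        have hcl : l.countP (fun x => decide (x ≤ n)) = s.countP (fun x => decide (x ≤ n)) :=
          (hperm.countP_eq _).symm
        have hsplit : s.countP (fun x => decide (x ≤ n))
            = t.countP (fun x => decide (x ≤ n)) + rest.countP (fun x => decide (x ≤ n)) := by
          rw [hdec, List.countP_append]
        have htfull : t.countP (fun x => decide (x ≤ n)) = t.length := by
          rw [List.countP_eq_length]
          intro x hx; have := htle x hx; simp; omega
        rw [hk', hcl, hsplit, htfull, hk]; push_cast; ring
      -- invariant for the next iteration
      have hdec2 : s = (t ++ t') ++ (advanceB rest k n).1 := by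
        rw [List.append_assoc, ← ht']; exact hdec
      have hk2 : (advanceB rest k n).2 = ((t ++ t').length : Int) := by
        have h1 : t'.countP (fun x => decide (x ≤ n)) = t'.length :=
          List.countP_eq_length.mpr (fun x hx => by simpa using htle' x hx)
        have h0 : (advanceB rest k n).1.countP (fun x => decide (x ≤ n)) = 0 :=
          List.countP_eq_zero.mpr (fun x hx => by have := hgt' x hx; simp; omega)
        have hrc : rest.countP (fun x => decide (x ≤ n)) = t'.length := by
          rw [ht', List.countP_append, h1, h0]; omega
        rw [hk', hk, hrc]
        push_cast [List.length_append]
        ring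
      have htle2 : ∀ x ∈ t ++ t', x ≤ (n + 1) - 1 := by
        intro x hx
        rcases List.mem_append.mp hx with hx | hx
        · have := htle x hx; omega
        · have := htle' x hx; omega
      have ha2 : a + 2 * (advanceB rest k n).2 - l.length = calcFuel l (n + 1) := by
        rw [hcount, ha, calcFuel_step]
      simp only [loopB]
      rw [ih (n + 1) (advanceB rest k n).1 (advanceB rest k n).2 _ (t ++ t') hdec2 hk2 htle2 ha2]
      rw [List.range_succ_eq_map]
      simp only [List.map_cons, List.map_map]
      refine List.cons_eq_cons.mpr ⟨?_, ?_⟩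
      · show _ = costA part2 l (n + ((0 : Nat) : Int))
        unfold costA
        cases part2 with
        | false => simpa using ha
        | true =>
            simp only [if_pos, Nat.cast_zero, add_zero]
            rw [ha]
            exact part2_closed l n
      · apply List.map_congr_left
        intro j _
        simp only [Function.comp]
        congr 1
        push_cast; ring

-- A's loop is a map over the range
theorem calcTotalFuel_eq_map (l : List Int) (part2 : Bool) (m : Int)
    (hm : PySem.List.max? l (fun x => x) = some m) :
    calcTotalFuel l part2 = (List.range m.toNat).map (fun k : Nat => costA part2 l (k : Int)) := by
  unfold calcTotalFuel
  rw [hm]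
  show (PySem.List.pyRange 0 m 1).foldl
      (fun costs i => costs ++ [if part2 then calcFuel2 l i else calcFuel l i]) [] = _
  rw [PySem.List.foldl_append_singleton_eq_map (fun i => if part2 then calcFuel2 l i else calcFuel l i)]
  rw [PySem.List.pyRange_one, List.map_map]
  simp [costA, Function.comp]

-- ===== VERDICT (by name: the statement is the Claim_ definition above) =====
theorem calcTotalFuel_spec : Claim_equal_calcTotalFuel := by
  intro l part2 _ hpre
  unfold Spec_calcTotalFuel
  obtain ⟨m, hm⟩ : ∃ m, PySem.List.max? l (fun x => x) = some m := by
    cases h : PySem.List.max? l (fun x => x) with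
    | none => exact absurd ((PySem.List.max?_eq_none_iff l _).mp h) hpre
    | some m => exact ⟨m, rfl⟩
  rw [calcTotalFuel_eq_map l part2 m hm]
  unfold calcTotalFuel_alt
  rw [hm]
  have hs1 : l.foldl (fun acc x => acc + x) 0 = (l.map (fun x => x)).sum := by
    rw [PySem.List.foldl_add l (fun x => x) 0]; ring
  have hs2 : l.foldl (fun acc x => acc + x * x) 0 = (l.map (fun x => x * x)).sum := by
    rw [PySem.List.foldl_add l (fun x => x * x) 0]; ring
  have ha : l.foldl (fun acc x => acc + |x|) 0 = calcFuel l 0 := by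
    rw [PySem.List.foldl_add l (fun x => |x|) 0, calcFuel_eq_sum]; simp
  simp only [hs1, hs2, ha]
  rw [loopB_spec part2 l (PySem.List.sorted l (fun x => x))
      (PySem.List.sorted_perm l (fun x => x) false)
      (PySem.List.sorted_pairwise l (fun x => x))
      m.toNat 0 (PySem.List.sorted l (fun x => x)) 0 (calcFuel l 0) []
      (by simp) (by simp) (by simp) rfl]
  apply List.map_congr_left
  intro j _
  congr 1
  omega
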